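-- pv_equiv track=rewrite | github.com/hong56hk/algo | coditiy/task_4.py | solution
-- ===== SOURCE A (Python) =====
-- def remove_sub_question(s):
--     for i in range(len(s)-1, 0 , -1):
--         if s[i].isdigit():
--             return s[:i+1]
--     return s
--
-- def solution(T, R):
--     grouped = {}
--
--     for i in range(len(T)):
--         test = T[i]
--         testname = remove_sub_question(test)
--
--         if R[i] == "OK":
--             if testname in grouped:
--                 grouped[testname] = True and grouped[testname]
--             else:
--                 grouped[testname] = True
--         else:
--             grouped[testname] = False
--
--     score = 0
--     for v in grouped.values():
--         if v:
--             score += 1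
--     return score  * 100  // len(grouped.values())
-- ===== SOURCE B (Python) =====
-- def remove_sub_question(s):
--     for i in range(len(s)-1, 0 , -1):
--         if s[i].isdigit():
--             return s[:i+1]
--     return s
--
-- def solution(T, R):
--     names = [remove_sub_question(t) for t in T]
--     groups = []
--     for name in names:
--         if name not in groups:
--             groups.append(name)
--     passing = 0
--     for g in groups:
--         if all(r == "OK" for name, r in zip(names, R) if name == g):
--             passing += 1
--     return passing * 100 // len(groups)
-- ===== Notes on version B (the rewrite author's own statement) =====
-- stated objective: alternative
-- what changed: Replaces A's single-pass boolean dict (per-group all-OK flag maintained with an in/else AND branch, then a value-counting loop) by staged passes: build the name list, dedup it into an ordered group list, then for each group re-scan the zipped (name, result) pairs with all(); trades the hash map for a per-group nested rescan.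
import Mathlib
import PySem

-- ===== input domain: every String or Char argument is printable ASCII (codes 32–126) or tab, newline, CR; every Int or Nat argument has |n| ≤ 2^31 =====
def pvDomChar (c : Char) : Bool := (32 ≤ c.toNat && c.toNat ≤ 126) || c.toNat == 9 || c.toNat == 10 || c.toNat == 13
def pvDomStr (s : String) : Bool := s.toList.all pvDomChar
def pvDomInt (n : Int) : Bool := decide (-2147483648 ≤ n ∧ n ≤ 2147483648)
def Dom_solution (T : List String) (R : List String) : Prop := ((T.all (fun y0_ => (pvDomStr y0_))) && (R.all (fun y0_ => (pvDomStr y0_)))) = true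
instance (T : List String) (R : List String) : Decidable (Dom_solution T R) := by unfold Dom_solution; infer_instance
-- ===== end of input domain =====

-- B replaces A's single-pass boolean dict by staged passes: build the group-name list,
-- dedup it in order, then decide each group by re-scanning the zipped (name, result)
-- pairs; objective: alternative. Return value only; neither version mutates its arguments.

-- ===== PORT A =====
-- helper shared verbatim by Source A and Source B: keep everything up to the last digit at an
-- index ≥ 1, else return s unchanged; the for/early-return loop is recursion over the
-- countdown range.
def rsqLoop (s : String) : List Int → String
  | [] => s
  | i :: rest =>
      if PySem.Chars.isdigit ((PySem.Str.pyGet? s i).getD ' ') then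
        PySem.Str.slice s none (some (i + 1))
      else rsqLoop s rest

def remove_sub_question (s : String) : String :=
  rsqLoop s (PySem.List.pyRange (PySem.Str.len s - 1) 0 (-1))

def solution (T : List String) (R : List String) : Int :=
  let grouped := (PySem.List.pyRange 0 (T.length : Int) 1).foldl
    (fun (g : PySem.Dict String Bool) i =>
      let test := PySem.List.pyGetD T i ""
      let testname := remove_sub_question test
      if PySem.List.pyGetD R i "" == "OK" then
        if g.contains testname then g.insert testname (true && g.getD testname true)
        else g.insert testname true
      else g.insert testname false)
    PySem.Dict.empty
  let score := grouped.values.foldl (fun s v => if v then s + 1 else s) (0 : Int)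
  PySem.Int.floordiv (score * 100) (grouped.values.length : Int)

-- ===== PORT B =====
def solution_alt (T : List String) (R : List String) : Int :=
  let names := T.map remove_sub_question
  let groups := names.foldl
    (fun (gs : List String) name => if gs.contains name then gs else gs ++ [name]) []
  let passing := groups.foldl
    (fun (p : Int) g =>
      if ((names.zip R).filter (fun pr => pr.1 == g)).all (fun pr => pr.2 == "OK")
      then p + 1 else p) 0
  PySem.Int.floordiv (passing * 100) (groups.length : Int)

-- ===== PRECONDITION & SPEC =====
-- Pre_ excludes exactly the inputs where A raises: T = [] (ZeroDivisionError from
-- `// len(grouped.values())`) and len(T) > len(R) (IndexError from R[i]).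
def Pre_solution (T : List String) (R : List String) : Prop := T ≠ [] ∧ T.length ≤ R.length
instance (T : List String) (R : List String) : Decidable (Pre_solution T R) := by unfold Pre_solution; infer_instance
def pvWitness_solution : List String × List String := (["test1a", "test1b"], ["OK", "OK"])

def Spec_solution (T : List String) (R : List String) (out : Int) : Prop := out = solution_alt T R
instance (T : List String) (R : List String) (out : Int) : Decidable (Spec_solution T R out) := by unfold Spec_solution; infer_instance

-- ===== CLAIM (what is proved, stated in full; the proofs are below) =====
def Claim_equal_solution : Prop := ∀ (T : List String) (R : List String), Dom_solution T R → Pre_solution T R → Spec_solution T R (solution T R)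

-- ===== LEMMAS AND PROOFS =====

-- the per-group verdict over a list of (group name, result) pairs: all its results "OK"
def pvFlag (L : List (String × String)) (g : String) : Bool :=
  (L.filter (fun p => p.1 == g)).all (fun p => p.2 == "OK")

-- A's loop body on one (name, result) pair
def pvAStep (g : PySem.Dict String Bool) (p : String × String) : PySem.Dict String Bool :=
  if p.2 == "OK" then
    if g.contains p.1 then g.insert p.1 (true && g.getD p.1 true) else g.insert p.1 true
  else g.insert p.1 false

-- every branch of A's body is one insert of (result is OK) && (old all-OK flag)
lemma pvAStep_eq (d : PySem.Dict String Bool) (p : String × String) :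
    pvAStep d p = d.insert p.1 ((p.2 == "OK") && d.getD p.1 true) := by
  unfold pvAStep
  by_cases hok : (p.2 == "OK") = true
  · by_cases hc : d.contains p.1 = true
    · simp [hok, hc]
    · have := PySem.Dict.getD_of_not_contains (d := d) (k := p.1) (d0 := true)
        (by simpa using hc)
      simp [hok, hc, this]
  · simp [hok]

-- A's dict maps every group name to pvFlag of the processed pairs
lemma pv_getD (L : List (String × String)) (g : String) :
    (L.foldl pvAStep PySem.Dict.empty).getD g true = pvFlag L g := by
  induction L using List.reverseRecOn with
  | nil => simp [pvFlag, PySem.Dict.getD_empty]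
  | append_singleton L p ih =>
      rw [List.foldl_append, List.foldl_cons, List.foldl_nil, pvAStep_eq,
        PySem.Dict.getD_insert]
      unfold pvFlag at ih ⊢
      rw [List.filter_append]
      by_cases h : g = p.1
      · subst h
        simp [ih, Bool.and_comm]
      · have h' : ¬ p.1 = g := fun hh => h hh.symm
        simp [h, h', ih]

-- A's index loop over range(len(T)) is the fold over zip(T, R) when len(T) ≤ len(R)
lemma pv_idx_fold {α : Type} (g : α → String → String → α) :
    ∀ (T R : List String) (init : α), T.length ≤ R.length →
    (PySem.List.pyRange 0 (T.length : Int) 1).foldl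
        (fun acc i => g acc (PySem.List.pyGetD T i "") (PySem.List.pyGetD R i "")) init
      = (T.zip R).foldl (fun acc p => g acc p.1 p.2) init := by
  intro T R init h
  rw [PySem.List.pyRange_one, List.foldl_map]
  induction T generalizing R init with
  | nil => simp
  | cons t T ih =>
      cases R with
      | nil => simp at h
      | cons r R =>
          have h' : T.length ≤ R.length := by simpa using h
          have en : ((((T.length + 1 : Nat) : Int)) - 0).toNat = T.length + 1 := by simp
          simp only [List.length_cons, List.zip_cons_cons, List.foldl_cons, en,
            List.range_succ_eq_map, List.foldl_map]
          have hhead : g init (PySem.List.pyGetD (t :: T) (0 + ((0 : Nat) : Int)) "")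
              (PySem.List.pyGetD (r :: R) (0 + ((0 : Nat) : Int)) "") = g init t r := by
            norm_num [PySem.List.pyGetD_natCast]
          have hfun : (fun (x : α) (y : Nat) => g x
                (PySem.List.pyGetD (t :: T) (0 + ((Nat.succ y : Nat) : Int)) "")
                (PySem.List.pyGetD (r :: R) (0 + ((Nat.succ y : Nat) : Int)) ""))
              = fun (x : α) (y : Nat) => g x (PySem.List.pyGetD T (0 + (y : Int)) "")
                (PySem.List.pyGetD R (0 + (y : Int)) "") := by
            funext x y
            norm_num
            have ec : ((y : Int) + 1) = (((y + 1 : Nat)) : Int) := by push_cast; ring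
            rw [ec, PySem.List.pyGetD_natCast, PySem.List.pyGetD_natCast]
            simp [List.getD]
          have en2 : (((T.length : Nat) : Int) - 0).toNat = T.length := by simp
          have := ih R (g init t r) h'
          rw [en2] at this
          simp only [Nat.cast_zero] at hhead ⊢
          rw [hhead, hfun, this]

-- A's counting loop over the values is countP
lemma pv_score (l : List Bool) :
    l.foldl (fun s v => if v then s + 1 else s) (0 : Int) = (l.countP id : Int) := by
  simpa [Function.comp] using PySem.List.foldl_count_if (fun v : Bool => v) l 0

lemma pv_main (T R : List String) (hlen : T.length ≤ R.length) :
    solution T R = solution_alt T R := by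
  unfold solution solution_alt
  rw [show (fun (g : PySem.Dict String Bool) (i : Int) =>
      let test := PySem.List.pyGetD T i ""
      let testname := remove_sub_question test
      if PySem.List.pyGetD R i "" == "OK" then
        if g.contains testname then g.insert testname (true && g.getD testname true)
        else g.insert testname true
      else g.insert testname false)
    = fun (g : PySem.Dict String Bool) (i : Int) =>
        pvAStep g (remove_sub_question (PySem.List.pyGetD T i ""),
          PySem.List.pyGetD R i "") from rfl]
  rw [pv_idx_fold (fun g t r => pvAStep g (remove_sub_question t, r)) T R _ hlen]
  have hfold : (T.zip R).foldl (fun acc p => pvAStep acc (remove_sub_question p.1, p.2))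
      PySem.Dict.empty
      = ((T.map remove_sub_question).zip R).foldl pvAStep PySem.Dict.empty := by
    rw [List.zip_map_left, List.foldl_map]
    rfl
  rw [hfold]
  set names := T.map remove_sub_question with hnames
  set L := names.zip R with hL
  have hfst : L.map Prod.fst = names := by
    rw [hL]
    exact List.map_fst_zip (by simpa [hnames] using hlen)
  set D := L.foldl pvAStep PySem.Dict.empty with hD
  have hstep : pvAStep = fun (d : PySem.Dict String Bool) (p : String × String) =>
      d.insert p.1 ((p.2 == "OK") && d.getD p.1 true) :=
    funext fun d => funext fun p => pvAStep_eq d p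
  have hkeys : D.keys = PySem.Set.ofList names := by
    rw [hD, hstep, PySem.Dict.keys_foldl_insert_key L Prod.fst _ _,
      hfst, PySem.Dict.keys_empty, PySem.Set.update_nil_left]
  have hnodup : D.keys.Nodup := by
    rw [hkeys]; exact PySem.Set.nodup_ofList names
  have hvals : D.values = D.keys.map (fun k => D.getD k true) :=
    PySem.Dict.values_eq_map_keys D hnodup true
  have hgroups : names.foldl
      (fun (gs : List String) name => if gs.contains name then gs else gs ++ [name]) []
      = PySem.Set.ofList names := by
    rw [PySem.Set.ofList_eq_foldl]
    rfl
  have hgetD : ∀ k, D.getD k true = pvFlag L k := fun k => by rw [hD]; exact pv_getD L k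
  have hpass : (PySem.Set.ofList names).foldl
      (fun (p : Int) g => if (L.filter (fun pr => pr.1 == g)).all (fun pr => pr.2 == "OK")
        then p + 1 else p) 0
      = (((PySem.Set.ofList names).countP (fun g => pvFlag L g)) : Int) := by
    simpa [Function.comp, pvFlag] using
      PySem.List.foldl_count_if (fun g => pvFlag L g) (PySem.Set.ofList names) 0
  simp only []
  rw [← hL, hvals, hkeys, pv_score, hgroups, hpass]
  have hcnt : ((PySem.Set.ofList names).map (fun k => D.getD k true)).countP id
      = (PySem.Set.ofList names).countP (fun g => pvFlag L g) := by
    rw [List.countP_map]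
    exact List.countP_congr (fun k _ => by simp [Function.comp, hgetD k])
  rw [hcnt]
  simp

-- ===== VERDICT (by name: the statement is the Claim_ definition above) =====
theorem solution_spec : Claim_equal_solution := by
  intro T R _hDom hPre
  unfold Spec_solution
  exact pv_main T R hPre.2
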